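-- pv_equiv track=rewrite | github.com/XJenso73/AdventOfCode | 2023/day05.py | _find_minimum_location_mystery_two
-- ===== SOURCE A (Python) =====
-- def _find_minimum_location_mystery_two(seeds: list[int], all_maps: list[tuple[int, ...]]) -> int:
--     intervals = []
--     for i in range(0, len(seeds), 2):
--         start = seeds[i]
--         length = seeds[i + 1]
--         intervals.append((start, start + length))
--
--     for mapping_layer in all_maps:
--         new_intervals = []
--
--         while intervals:
--             start, end = intervals.pop()
--
--             found_overlap = False
--             for dest, src, length in mapping_layer:
--                 src_end = src + length
--                 overlap_start = max(start, src)
--                 overlap_end = min(end, src_end)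
--
--                 if overlap_start < overlap_end:
--                     offset = dest - src
--                     new_intervals.append((overlap_start + offset, overlap_end + offset))
--
--                     if overlap_start > start:
--                         intervals.append((start, overlap_start))
--                     if overlap_end < end:
--                         intervals.append((overlap_end, end))
--
--                     found_overlap = True
--                     break
--
--             if not found_overlap:
--                 new_intervals.append((start, end))
--
--         intervals = new_intervals
--
--     return min(start for start, end in intervals)
-- ===== SOURCE B (Python) =====
-- def _find_minimum_location_mystery_two(seeds: list[int], all_maps: list[tuple[int, ...]]) -> int:
--     def split(start, end, layer):
--         for dest, src, length in layer:
--             lo = max(start, src)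
--             hi = min(end, src + length)
--             if lo < hi:
--                 off = dest - src
--                 segs = [(lo + off, hi + off)]
--                 if lo > start:
--                     segs += split(start, lo, layer)
--                 if hi < end:
--                     segs += split(hi, end, layer)
--                 return segs
--         return [(start, end)]
--
--     intervals = [(seeds[i], seeds[i] + seeds[i + 1]) for i in range(0, len(seeds), 2)]
--     for layer in all_maps:
--         intervals = [seg for iv in intervals for seg in split(iv[0], iv[1], layer)]
--     return min(s for s, _ in intervals)
-- ===== Notes on version B (the rewrite author's own statement) =====
-- stated objective: simpler
-- what changed: A's per-layer mutable worklist (pop from the back, break on first overlap, requeue the leftover pieces, found_overlap flag) is replaced by a direct recursive split of each interval: the first overlapping range maps the overlap and the two leftover pieces are split recursively, the layer's output being a flat comprehension over the intervals.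
import Mathlib
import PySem

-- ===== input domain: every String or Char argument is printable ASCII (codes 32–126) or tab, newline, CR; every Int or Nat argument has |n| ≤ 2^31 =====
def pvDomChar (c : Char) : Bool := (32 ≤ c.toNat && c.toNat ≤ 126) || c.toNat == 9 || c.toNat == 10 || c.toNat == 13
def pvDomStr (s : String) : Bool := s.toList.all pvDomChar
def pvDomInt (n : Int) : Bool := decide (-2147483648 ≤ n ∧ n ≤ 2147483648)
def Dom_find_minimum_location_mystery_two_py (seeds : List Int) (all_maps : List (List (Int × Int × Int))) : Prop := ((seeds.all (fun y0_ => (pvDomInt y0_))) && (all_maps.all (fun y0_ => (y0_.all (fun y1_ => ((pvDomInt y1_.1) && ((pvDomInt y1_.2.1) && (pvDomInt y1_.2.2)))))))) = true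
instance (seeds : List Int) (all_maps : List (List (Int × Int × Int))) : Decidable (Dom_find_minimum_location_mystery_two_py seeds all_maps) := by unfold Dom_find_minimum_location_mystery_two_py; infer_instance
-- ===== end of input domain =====

-- B replaces A's explicit pop/push worklist per layer by direct recursion on each interval
-- (first overlapping range → mapped overlap plus recursive splits of the two leftovers);
-- objective: simpler (no mutable worklist / flag / break), same asymptotic cost.

-- ===== PORT A =====

-- inner `for dest, src, length in mapping_layer` loop with `break` at the first overlap:
-- returns `none` if no range overlaps (found_overlap stays False), else the mapped
-- interval together with the list of leftover intervals pushed back onto the worklist.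
def pvInnerA (start stop : Int) : List (Int × Int × Int) → Option ((Int × Int) × List (Int × Int))
  | [] => none
  | (dest, src, length) :: rest =>
    let src_end := src + length
    let overlap_start := max start src
    let overlap_end := min stop src_end
    if overlap_start < overlap_end then
      let offset := dest - src
      some ((overlap_start + offset, overlap_end + offset),
        (if overlap_start > start then [(start, overlap_start)] else []) ++
        (if overlap_end < stop then [(overlap_end, stop)] else []))
    else pvInnerA start stop rest

-- worklist weight used only for termination of the `while intervals:` loop
def pvIvW (p : Int × Int) : Nat := 2 * (p.2 - p.1).toNat + 1
def pvStW (l : List (Int × Int)) : Nat := (l.map pvIvW).sum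

-- the `while intervals:` loop of one mapping layer: pop from the back,
-- map / requeue, accumulate new_intervals in `acc`. The Nat fuel is only a
-- totality guard: each iteration strictly decreases pvStW, so fuel pvStW stack
-- always suffices (the fuel-0 branch is reached only with an empty stack).
def pvLayerAF (layer : List (Int × Int × Int)) : Nat → List (Int × Int) → List (Int × Int) → List (Int × Int)
  | 0, _, acc => acc
  | n + 1, stack, acc =>
    match stack.getLast? with
    | none => acc
    | some (s, e) =>
      match pvInnerA s e layer with
      | some (m, pushed) => pvLayerAF layer n (stack.dropLast ++ pushed) (acc ++ [m])
      | none => pvLayerAF layer n stack.dropLast (acc ++ [(s, e)])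

def pvLayerA (layer : List (Int × Int × Int)) (stack acc : List (Int × Int)) : List (Int × Int) :=
  pvLayerAF layer (pvStW stack) stack acc

-- `for i in range(0, len(seeds), 2): intervals.append((seeds[i], seeds[i] + seeds[i+1]))`
def pvBuildA (seeds : List Int) : List (Int × Int) :=
  (PySem.List.pyRange 0 (seeds.length : Int) 2).foldl
    (fun acc i =>
      let start := PySem.List.pyGetD seeds i 0
      let length := PySem.List.pyGetD seeds (i + 1) 0
      acc ++ [(start, start + length)]) []

def find_minimum_location_mystery_two_py (seeds : List Int) (all_maps : List (List (Int × Int × Int))) : Int :=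
  let intervals := pvBuildA seeds
  let final := all_maps.foldl (fun ivs layer => pvLayerA layer ivs []) intervals
  -- min(start for start, end in intervals); ValueError (= none) excluded by Pre_
  (PySem.List.min? (final.map Prod.fst) (fun x => x)).getD 0

-- ===== PORT B =====

-- recursive `split`: first overlapping range of the layer maps the overlap,
-- the leftover pieces are split recursively; no overlap → identity segment.
-- The Nat fuel is only a totality guard: each recursive call strictly shrinks
-- the interval, so fuel (stop - start).toNat always suffices (at fuel 0 the
-- interval is empty, where no range can overlap and find? returns none anyway).
def pvSplitBF (layer : List (Int × Int × Int)) : Nat → Int → Int → List (Int × Int)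
  | 0, start, stop => [(start, stop)]
  | n + 1, start, stop =>
    match layer.find? (fun t => decide (max start t.2.1 < min stop (t.2.1 + t.2.2))) with
    | none => [(start, stop)]
    | some (dest, src, length) =>
      let lo := max start src
      let hi := min stop (src + length)
      let off := dest - src
      [(lo + off, hi + off)]
        ++ (if lo > start then pvSplitBF layer n start lo else [])
        ++ (if hi < stop then pvSplitBF layer n hi stop else [])

def pvSplitB (layer : List (Int × Int × Int)) (start stop : Int) : List (Int × Int) :=
  pvSplitBF layer (stop - start).toNat start stop

-- `[(seeds[i], seeds[i] + seeds[i+1]) for i in range(0, len(seeds), 2)]`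
-- (raises IndexError on odd-length seeds exactly as A does; excluded by Pre_)
def pvBuildB (seeds : List Int) : List (Int × Int) :=
  (PySem.List.pyRange 0 (seeds.length : Int) 2).map
    (fun i => (PySem.List.pyGetD seeds i 0,
      PySem.List.pyGetD seeds i 0 + PySem.List.pyGetD seeds (i + 1) 0))

def find_minimum_location_mystery_two_py_alt (seeds : List Int) (all_maps : List (List (Int × Int × Int))) : Int :=
  let intervals := pvBuildB seeds
  let final := all_maps.foldl (fun ivs layer => ivs.flatMap (fun iv => pvSplitB layer iv.1 iv.2)) intervals
  (PySem.List.min? (final.map Prod.fst) (fun x => x)).getD 0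

-- ===== PRECONDITION & SPEC =====
-- Pre_ excludes exactly the inputs where Python A raises: empty seeds (ValueError on
-- min of an empty sequence) and odd-length seeds (IndexError on seeds[i + 1]).
def Pre_find_minimum_location_mystery_two_py (seeds : List Int) (all_maps : List (List (Int × Int × Int))) : Prop :=
  seeds ≠ [] ∧ seeds.length % 2 = 0
instance (seeds : List Int) (all_maps : List (List (Int × Int × Int))) : Decidable (Pre_find_minimum_location_mystery_two_py seeds all_maps) := by unfold Pre_find_minimum_location_mystery_two_py; infer_instance

def pvWitness_find_minimum_location_mystery_two_py : List Int × (List (List (Int × Int × Int))) :=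
  ([1, 2], [[(10, 0, 5)]])

def Spec_find_minimum_location_mystery_two_py (seeds : List Int) (all_maps : List (List (Int × Int × Int))) (out : Int) : Prop := out = find_minimum_location_mystery_two_py_alt seeds all_maps
instance (seeds : List Int) (all_maps : List (List (Int × Int × Int))) (out : Int) : Decidable (Spec_find_minimum_location_mystery_two_py seeds all_maps out) := by unfold Spec_find_minimum_location_mystery_two_py; infer_instance

-- ===== CLAIM (what is proved, stated in full; the proofs are below) =====
def Claim_equal_find_minimum_location_mystery_two_py : Prop := ∀ (seeds : List Int) (all_maps : List (List (Int × Int × Int))), Dom_find_minimum_location_mystery_two_py seeds all_maps → Pre_find_minimum_location_mystery_two_py seeds all_maps → Spec_find_minimum_location_mystery_two_py seeds all_maps (find_minimum_location_mystery_two_py seeds all_maps)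

-- ===== LEMMAS AND PROOFS =====

theorem pvInnerA_pushed_lt {s e : Int} {layer : List (Int × Int × Int)}
    {m : Int × Int} {pushed : List (Int × Int)}
    (h : pvInnerA s e layer = some (m, pushed)) : pvStW pushed < pvIvW (s, e) := by
  induction layer with
  | nil => simp [pvInnerA] at h
  | cons t rest ih =>
    obtain ⟨dest, src, length⟩ := t
    simp only [pvInnerA] at h
    split at h
    · rename_i hov
      simp only [Option.some.injEq, Prod.mk.injEq] at h
      obtain ⟨-, hp⟩ := h
      subst hp
      simp only [max_lt_iff, lt_min_iff] at hov
      split_ifs with h1 h2 h2 <;>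
        simp [pvStW, pvIvW] <;> omega
    · exact ih h

theorem pvStW_append (a b : List (Int × Int)) : pvStW (a ++ b) = pvStW a + pvStW b := by
  simp [pvStW]

theorem pv_build_eq (seeds : List Int) :
    pvBuildA seeds = pvBuildB seeds := by
  unfold pvBuildA pvBuildB
  rw [PySem.List.foldl_append_singleton_eq_map
    (f := fun i => ((PySem.List.pyGetD seeds i 0),
      (PySem.List.pyGetD seeds i 0) + (PySem.List.pyGetD seeds (i + 1) 0)))]
  simp

theorem pv_find_none_of_le {s e : Int} (layer : List (Int × Int × Int)) (h : e ≤ s) :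
    layer.find? (fun t => decide (max s t.2.1 < min e (t.2.1 + t.2.2))) = none := by
  rw [List.find?_eq_none]
  intro t _
  simp only [decide_eq_true_eq, max_lt_iff, lt_min_iff, not_and]
  omega

theorem pvSplitBF_congr (layer : List (Int × Int × Int)) :
    ∀ n m (s e : Int), (e - s).toNat ≤ n → (e - s).toNat ≤ m →
      pvSplitBF layer n s e = pvSplitBF layer m s e := by
  intro n
  induction n with
  | zero =>
    intro m s e hn _
    have hle : e ≤ s := by omega
    cases m with
    | zero => rfl
    | succ k => rw [pvSplitBF, pvSplitBF, pv_find_none_of_le layer hle]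
  | succ n ih =>
    intro m s e hn hm
    cases m with
    | zero =>
      have hle : e ≤ s := by omega
      rw [pvSplitBF, pvSplitBF, pv_find_none_of_le layer hle]
    | succ k =>
      rw [pvSplitBF, pvSplitBF]
      cases hf : layer.find? (fun t => decide (max s t.2.1 < min e (t.2.1 + t.2.2))) with
      | none => rfl
      | some t =>
        obtain ⟨dest, src, length⟩ := t
        have hov := List.find?_some hf
        simp only [decide_eq_true_eq, max_lt_iff, lt_min_iff] at hov
        simp only
        congr 1
        congr 1
        · split
          · rename_i hlo
            exact ih k s (max s src) (by omega) (by omega)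
          · rfl
        · split
          · rename_i hhi
            exact ih k (min e (src + length)) e (by omega) (by omega)
          · rfl

theorem pvSplitB_of_none {s e : Int} {layer : List (Int × Int × Int)}
    (hf : layer.find? (fun t => decide (max s t.2.1 < min e (t.2.1 + t.2.2))) = none) :
    pvSplitB layer s e = [(s, e)] := by
  rw [pvSplitB]
  cases h : (e - s).toNat with
  | zero => rfl
  | succ n => rw [pvSplitBF, hf]

theorem pvSplitB_of_some {s e dest src length : Int} {layer : List (Int × Int × Int)}
    (hf : layer.find? (fun t => decide (max s t.2.1 < min e (t.2.1 + t.2.2)))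
      = some (dest, src, length)) :
    pvSplitB layer s e =
      [(max s src + (dest - src), min e (src + length) + (dest - src))]
        ++ (if max s src > s then pvSplitB layer s (max s src) else [])
        ++ (if min e (src + length) < e then pvSplitB layer (min e (src + length)) e else []) := by
  have hov := List.find?_some hf
  simp only [decide_eq_true_eq, max_lt_iff, lt_min_iff] at hov
  rw [pvSplitB]
  cases h : (e - s).toNat with
  | zero => omega
  | succ n =>
    rw [pvSplitBF, hf]
    simp only
    have h2 : (if max s src > s then pvSplitBF layer n s (max s src) else [])
        = (if max s src > s then pvSplitB layer s (max s src) else []) := by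
      split
      · exact pvSplitBF_congr layer n _ s (max s src) (by omega) (le_refl _)
      · rfl
    have h3 : (if min e (src + length) < e then pvSplitBF layer n (min e (src + length)) e else [])
        = (if min e (src + length) < e then pvSplitB layer (min e (src + length)) e else []) := by
      split
      · exact pvSplitBF_congr layer n _ (min e (src + length)) e (by omega) (le_refl _)
      · rfl
    rw [h2, h3]

theorem pvSplitB_ne_nil (layer : List (Int × Int × Int)) (s e : Int) :
    pvSplitB layer s e ≠ [] := by
  rw [pvSplitB]
  cases (e - s).toNat with
  | zero => simp [pvSplitBF]
  | succ n => rw [pvSplitBF]; split <;> simp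

-- the `break`-at-first-overlap loop of A is the `find?` of B, with the mapped
-- interval and the two leftovers computed from the found range
theorem pvInnerA_char (s e : Int) (layer : List (Int × Int × Int)) :
    pvInnerA s e layer =
      (layer.find? (fun t => decide (max s t.2.1 < min e (t.2.1 + t.2.2)))).map
        (fun t =>
          ((max s t.2.1 + (t.1 - t.2.1), min e (t.2.1 + t.2.2) + (t.1 - t.2.1)),
           (if max s t.2.1 > s then [(s, max s t.2.1)] else []) ++
           (if min e (t.2.1 + t.2.2) < e then [(min e (t.2.1 + t.2.2), e)] else []))) := by
  induction layer with
  | nil => simp [pvInnerA]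
  | cons t rest ih =>
    obtain ⟨dest, src, length⟩ := t
    rw [pvInnerA, List.find?]
    by_cases hc : max s src < min e (src + length)
    · simp [hc]
    · simp only [hc, decide_false]
      exact ih

theorem pvStW_eq_zero {stack : List (Int × Int)} (h : pvStW stack = 0) : stack = [] := by
  cases stack with
  | nil => rfl
  | cons x tl => simp [pvStW, pvIvW] at h

theorem pvLayerAF_perm (layer : List (Int × Int × Int)) :
    ∀ n stack acc, pvStW stack ≤ n →
      (pvLayerAF layer n stack acc).Perm
        (acc ++ stack.flatMap (fun iv => pvSplitB layer iv.1 iv.2)) := by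
  intro n
  induction n with
  | zero =>
    intro stack acc hn
    have h0 : stack = [] := pvStW_eq_zero (Nat.le_zero.mp hn)
    subst h0
    simp [pvLayerAF]
  | succ n ih =>
    intro stack acc hn
    rw [pvLayerAF]
    split
    · rename_i hl
      have : stack = [] := List.getLast?_eq_none_iff.mp hl
      subst this
      simp
    · rename_i s e hl
      obtain ⟨ys, hys⟩ := List.getLast?_eq_some_iff.mp hl
      have hdl : stack.dropLast = ys := by rw [hys]; simp
      have h1 : pvStW [(s, e)] = pvIvW (s, e) := by simp [pvStW]
      rw [hys, pvStW_append] at hn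
      split
      · -- found_overlap: first overlapping range maps the overlap, leftovers requeued
        rename_i m pushed hinner
        have hchar := pvInnerA_char s e layer
        rw [hinner] at hchar
        obtain ⟨t, hf, hg⟩ := (Option.map_eq_some_iff).mp hchar.symm
        obtain ⟨dest, src, length⟩ := t
        simp only [Prod.mk.injEq] at hg
        obtain ⟨hm, hp⟩ := hg
        have hlt' := pvInnerA_pushed_lt hinner
        have hih := ih (stack.dropLast ++ pushed) (acc ++ [m])
          (by rw [hdl, pvStW_append]; omega)
        refine hih.trans ?_
        -- unfold B's split at (s, e) using the same find? result
        have hsplit : pvSplitB layer s e =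
            [m] ++ (if max s src > s then pvSplitB layer s (max s src) else []) ++
              (if min e (src + length) < e then pvSplitB layer (min e (src + length)) e else []) := by
          rw [pvSplitB_of_some hf, hm]
        have hpush : pushed.flatMap (fun iv => pvSplitB layer iv.1 iv.2) =
            (if max s src > s then pvSplitB layer s (max s src) else []) ++
              (if min e (src + length) < e then pvSplitB layer (min e (src + length)) e else []) := by
          rw [← hp]
          split_ifs <;> simp
        rw [hdl, hys]
        simp only [List.flatMap_append, hpush, hsplit, List.flatMap_cons, List.flatMap_nil,
          List.append_nil, List.append_assoc]
        refine List.Perm.append_left acc ?_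
        have := (List.perm_append_comm
          (l₁ := [m])
          (l₂ := ys.flatMap (fun iv => pvSplitB layer iv.1 iv.2))).append_right
          ((if max s src > s then pvSplitB layer s (max s src) else []) ++
            (if min e (src + length) < e then pvSplitB layer (min e (src + length)) e else []))
        simpa [List.append_assoc] using this
      · -- no overlap: the interval is copied over unchanged
        rename_i hinner
        have hchar := pvInnerA_char s e layer
        rw [hinner] at hchar
        have hf : layer.find? (fun t => decide (max s t.2.1 < min e (t.2.1 + t.2.2))) = none :=
          Option.map_eq_none_iff.mp hchar.symm
        have hsplit : pvSplitB layer s e = [(s, e)] := pvSplitB_of_none hf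
        have hih := ih stack.dropLast (acc ++ [(s, e)])
          (by rw [hdl]; simp [pvIvW] at h1; omega)
        refine hih.trans ?_
        rw [hdl, hys]
        simp only [List.flatMap_append, hsplit, List.flatMap_cons, List.flatMap_nil,
          List.append_nil, List.append_assoc]
        refine List.Perm.append_left acc ?_
        exact List.perm_append_comm

theorem pvLayerA_perm (layer : List (Int × Int × Int)) :
    ∀ stack acc, (pvLayerA layer stack acc).Perm
      (acc ++ stack.flatMap (fun iv => pvSplitB layer iv.1 iv.2)) :=
  fun stack acc => pvLayerAF_perm layer (pvStW stack) stack acc (le_refl _)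

theorem pv_final_perm (all_maps : List (List (Int × Int × Int))) :
    ∀ {l1 l2 : List (Int × Int)}, l1.Perm l2 →
      (all_maps.foldl (fun ivs layer => pvLayerA layer ivs []) l1).Perm
      (all_maps.foldl (fun ivs layer => ivs.flatMap (fun iv => pvSplitB layer iv.1 iv.2)) l2) := by
  induction all_maps with
  | nil => exact fun h => h
  | cons layer rest ih =>
    intro l1 l2 h
    exact ih (((pvLayerA_perm layer l1 []).trans (List.Perm.flatMap h (fun a _ => List.Perm.refl _))))

theorem pvBfinal_ne_nil :
    ∀ (all_maps : List (List (Int × Int × Int))) (ivs : List (Int × Int)), ivs ≠ [] →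
      all_maps.foldl (fun ivs layer => ivs.flatMap (fun iv => pvSplitB layer iv.1 iv.2)) ivs ≠ [] := by
  intro all_maps
  induction all_maps with
  | nil => exact fun ivs h => h
  | cons layer rest ih =>
    intro ivs h
    refine ih _ ?_
    cases ivs with
    | nil => exact absurd rfl h
    | cons iv tl =>
      simp only [List.flatMap_cons, ne_eq, List.append_eq_nil_iff, not_and]
      intro hsp
      exact absurd hsp (pvSplitB_ne_nil layer iv.1 iv.2)

theorem pv_min_eq_of_perm {l1 l2 : List Int} (h : l1.Perm l2) (hne : l1 ≠ []) :
    (PySem.List.min? l1 (fun x => x)).getD 0 = (PySem.List.min? l2 (fun x => x)).getD 0 := by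
  have h1 : PySem.List.min? l1 (fun x : Int => x) ≠ none := by
    rw [Ne, PySem.List.min?_eq_none_iff]; exact hne
  have h2 : PySem.List.min? l2 (fun x : Int => x) ≠ none := by
    rw [Ne, PySem.List.min?_eq_none_iff]
    intro hl2; exact hne (List.Perm.eq_nil (hl2 ▸ h))
  obtain ⟨m1, hm1⟩ := Option.ne_none_iff_exists'.mp h1
  obtain ⟨m2, hm2⟩ := Option.ne_none_iff_exists'.mp h2
  rw [hm1, hm2]
  simp only [Option.getD_some]
  exact le_antisymm
    (PySem.List.min?_isMin hm1 m2 (h.mem_iff.mpr (PySem.List.min?_mem hm2)))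
    (PySem.List.min?_isMin hm2 m1 (h.mem_iff.mp (PySem.List.min?_mem hm1)))

theorem pvBuildB_ne_nil (seeds : List Int) (hne : seeds ≠ []) : pvBuildB seeds ≠ [] := by
  unfold pvBuildB
  rw [PySem.List.pyRange_of_pos 0 (seeds.length : Int) (by norm_num)]
  have hlen : 0 < seeds.length := List.length_pos_iff.mpr hne
  have hcnt : (if (0:Int) < (seeds.length : Int) then
      (((seeds.length : Int) - 0 + 2 - 1) / 2).toNat else 0) ≠ 0 := by
    split <;> omega
  simp only [ne_eq, List.map_eq_nil_iff, List.map_eq_nil_iff, List.range_eq_nil]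
  exact hcnt

-- ===== VERDICT (by name: the statement is the Claim_ definition above) =====
theorem find_minimum_location_mystery_two_py_spec : Claim_equal_find_minimum_location_mystery_two_py := by
  intro seeds all_maps _ hpre
  obtain ⟨hne, hev⟩ := hpre
  unfold Spec_find_minimum_location_mystery_two_py
  unfold find_minimum_location_mystery_two_py find_minimum_location_mystery_two_py_alt
  simp only
  have hb := pv_build_eq seeds
  have hperm := pv_final_perm all_maps
    (l1 := pvBuildA seeds) (l2 := pvBuildB seeds) (by rw [hb])
  have hnil : pvBuildB seeds ≠ [] := pvBuildB_ne_nil seeds hne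
  have hfin : (all_maps.foldl (fun ivs layer => pvLayerA layer ivs []) (pvBuildA seeds)) ≠ [] := by
    intro hA
    exact pvBfinal_ne_nil all_maps _ hnil (List.Perm.eq_nil (hA ▸ hperm.symm))
  exact pv_min_eq_of_perm (hperm.map Prod.fst) (by simpa using hfin)
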